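-- pv_equiv track=rewrite | github.com/Gabriel-Arnold/Faculdade | Criptografia e Segurança de Sistemas Computacionais/Base4.py | encode64
-- ===== SOURCE A (Python) =====
-- def encode64(txt):
--     resultado = []
--
--     for char in txt:
--         ascii_val = ord(char)
--         base4 = ""
--
--         while ascii_val > 0:
--             base4 = str(ascii_val % 4) + base4
--             ascii_val //= 4
--
--         base4 = base4.zfill(4)
--
--         resultado.append(base4)
--
--     return " ".join(resultado)
-- ===== SOURCE B (Python) =====
-- def encode64(txt):
--     # Each ASCII code fits in 8 bits, so its four base-4 digits are just its
--     # four 2-bit groups, MSB first; no division loop needed.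
--     return " ".join(
--         "".join(str((ord(c) >> s) & 3) for s in (6, 4, 2, 0))
--         for c in txt
--     )
-- ===== Notes on version B (the rewrite author's own statement) =====
-- stated objective: idiomatic
-- what changed: Replaces the per-character while-loop of repeated %4 and //4 plus zfill with a direct read of each ASCII code's four 2-bit groups (bit shifts and masks), expressed as a join over generator expressions.
import Mathlib
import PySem

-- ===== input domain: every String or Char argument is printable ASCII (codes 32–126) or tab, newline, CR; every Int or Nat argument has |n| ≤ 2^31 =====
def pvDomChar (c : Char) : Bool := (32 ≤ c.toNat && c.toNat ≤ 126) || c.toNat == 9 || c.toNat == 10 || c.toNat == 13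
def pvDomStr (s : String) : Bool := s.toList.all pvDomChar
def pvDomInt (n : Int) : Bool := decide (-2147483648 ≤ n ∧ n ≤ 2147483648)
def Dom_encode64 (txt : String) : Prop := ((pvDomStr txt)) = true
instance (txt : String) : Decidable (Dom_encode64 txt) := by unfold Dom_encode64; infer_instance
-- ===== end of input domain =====

-- B replaces A's repeated div/mod base-conversion loop by reading each code's
-- four 2-bit groups directly (idiomatic one-liner; exact on ASCII codes < 256).

-- ===== PORT A =====
-- while ascii_val > 0: base4 = str(ascii_val % 4) + base4; ascii_val //= 4
-- (ascii_val = ord(char) ≥ 0, so Nat % and / are exactly Python's % and //)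
def encode64_loopA (n : Nat) (base4 : String) : String :=
  if n > 0 then encode64_loopA (n / 4) (PySem.Int.toStr ((n % 4 : Nat) : Int) ++ base4)
  else base4
decreasing_by exact Nat.div_lt_self (by omega) (by omega)

def encode64 (txt : String) : String :=
  let resultado : List String :=
    txt.toList.foldl (fun resultado char =>
      resultado ++ [PySem.Str.zfill (encode64_loopA char.toNat "") 4]) []
  PySem.Str.join " " resultado

-- ===== PORT B =====
def encode64_alt (txt : String) : String :=
  PySem.Str.join " " (txt.toList.map (fun c =>
    PySem.Str.join "" ([6, 4, 2, 0].map (fun s =>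
      PySem.Int.toStr (((c.toNat >>> s) &&& 3 : Nat) : Int)))))

-- ===== PRECONDITION & SPEC =====
def Spec_encode64 (txt : String) (out : String) : Prop := out = encode64_alt txt
instance (txt : String) (out : String) : Decidable (Spec_encode64 txt out) := by unfold Spec_encode64; infer_instance

-- ===== CLAIM (what is proved, stated in full; the proofs are below) =====
def Claim_equal_encode64 : Prop := ∀ (txt : String), Dom_encode64 txt → Spec_encode64 txt (encode64 txt)

-- ===== LEMMAS AND PROOFS =====
-- fueled List Char mirror of encode64_loopA (structural, so the kernel can evaluate it under decide)
def encode64_loopC : Nat → Nat → List Char → List Char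
  | 0, _, base4 => base4
  | fuel + 1, n, base4 =>
    if n > 0 then encode64_loopC fuel (n / 4) (PySem.Int.toChars ((n % 4 : Nat) : Int) ++ base4)
    else base4

theorem toList_loopA (fuel n : Nat) (s : String) (h : n < 4 ^ fuel) :
    (encode64_loopA n s).toList = encode64_loopC fuel n s.toList := by
  induction fuel generalizing n s with
  | zero =>
    have : n = 0 := Nat.lt_one_iff.mp (by simpa using h)
    subst this
    rw [encode64_loopA]
    simp [encode64_loopC]
  | succ f ih =>
    rw [encode64_loopA, encode64_loopC]
    split
    · next hn =>
      have h2 : n < 4 ^ f * 4 := by rw [pow_succ] at h; exact h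
      rw [ih (n / 4) _ ((Nat.div_lt_iff_lt_mul (by norm_num)).mpr h2)]
      simp [String.toList_append, PySem.Int.toList_toStr]
    · rfl

-- the per-character encodings agree on every character code below 256
set_option maxRecDepth 10000 in
theorem encode64_char_eq_chars : ∀ n : Fin 256,
    PySem.Chars.zfill (encode64_loopC 4 n.val []) 4 =
    PySem.Chars.join [] ([6, 4, 2, 0].map (fun s =>
      PySem.Int.toChars (((n.val >>> s) &&& 3 : Nat) : Int))) := by
  decide

theorem encode64_char_eq (n : Fin 256) :
    PySem.Str.zfill (encode64_loopA n.val "") 4 =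
    PySem.Str.join "" ([6, 4, 2, 0].map (fun s =>
      PySem.Int.toStr (((n.val >>> s) &&& 3 : Nat) : Int))) := by
  apply String.toList_inj.mp
  rw [PySem.Str.toList_zfill, toList_loopA 4 n.val "" (by omega), PySem.Str.toList_join]
  simpa [List.map_map, PySem.Int.toList_toStr, Function.comp] using encode64_char_eq_chars n

-- ===== VERDICT (by name: the statement is the Claim_ definition above) =====
theorem encode64_spec : Claim_equal_encode64 := by
  intro txt hdom
  unfold Spec_encode64 encode64 encode64_alt
  simp only [PySem.List.foldl_append_singleton_eq_map, List.nil_append]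
  congr 1
  apply List.map_congr_left
  intro c hc
  have hd : pvDomChar c = true := by
    unfold Dom_encode64 pvDomStr at hdom
    exact List.all_eq_true.mp hdom c hc
  have : c.toNat < 256 := by
    unfold pvDomChar at hd
    simp only [Bool.or_eq_true, Bool.and_eq_true, decide_eq_true_eq, beq_iff_eq] at hd
    omega
  exact encode64_char_eq ⟨c.toNat, this⟩
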